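-- pv_equiv track=rewrite | github.com/nathalia-santos/entendendo_algoritmos | expag90.py | duplicarFirst
-- ===== SOURCE A (Python) =====
-- def duplicarFirst(lista):
--     cont = 0
--     lista_duplicado_first = []
--     for i in lista:
--         if cont == 0:
--             multiplicacao = i * 2
--             lista_duplicado_first.append(multiplicacao)
--             cont += 1
--         else:
--             lista_duplicado_first.append(i)
--     return lista_duplicado_first
-- ===== SOURCE B (Python) =====
-- def duplicarFirst(lista):
--     nova = list(lista)
--     if nova:
--         nova[0] = nova[0] * 2
--     return nova
-- ===== Notes on version B (the rewrite author's own statement) =====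
-- stated objective: simpler
-- what changed: Replaces the per-element loop with a counter/branch by a wholesale list copy followed by a single in-place doubling of the first element.
import Mathlib
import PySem

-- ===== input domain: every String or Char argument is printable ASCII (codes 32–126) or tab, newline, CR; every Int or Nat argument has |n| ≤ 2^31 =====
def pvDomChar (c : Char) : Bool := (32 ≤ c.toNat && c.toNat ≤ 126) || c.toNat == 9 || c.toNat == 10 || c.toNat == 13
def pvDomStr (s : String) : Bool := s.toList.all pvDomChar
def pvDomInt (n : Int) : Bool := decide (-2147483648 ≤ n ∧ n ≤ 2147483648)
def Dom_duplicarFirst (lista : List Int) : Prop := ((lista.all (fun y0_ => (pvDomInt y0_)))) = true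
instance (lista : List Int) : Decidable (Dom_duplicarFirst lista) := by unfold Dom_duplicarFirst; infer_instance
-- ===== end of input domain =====

-- B copies the list and doubles the head in one step, instead of A's loop with a counter branch; objective: simpler.

-- ===== PORT A =====
-- A: fold over the list carrying (cont, accumulated output), appending i*2 when cont = 0 else i.
def duplicarFirst (lista : List Int) : List Int :=
  (lista.foldl (fun (st : Int × List Int) i =>
    if st.1 = 0 then (st.1 + 1, st.2 ++ [i * 2]) else (st.1, st.2 ++ [i]))
    (0, ([] : List Int))).2

-- ===== PORT B =====
-- B: copy, then double the first element if non-empty.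
def duplicarFirst_alt (lista : List Int) : List Int :=
  match lista with
  | [] => []
  | x :: rest => x * 2 :: rest

-- ===== PRECONDITION & SPEC =====
def Spec_duplicarFirst (lista : List Int) (out : List Int) : Prop := out = duplicarFirst_alt lista
instance (lista : List Int) (out : List Int) : Decidable (Spec_duplicarFirst lista out) := by unfold Spec_duplicarFirst; infer_instance

-- ===== CLAIM (what is proved, stated in full; the proofs are below) =====
def Claim_equal_duplicarFirst : Prop := ∀ (lista : List Int), Dom_duplicarFirst lista → Spec_duplicarFirst lista (duplicarFirst lista)

-- ===== LEMMAS AND PROOFS =====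

-- once cont = 1 the fold only appends each element unchanged
theorem dupFirst_tail_fold (rest : List Int) (acc : List Int) :
    (rest.foldl (fun (st : Int × List Int) i =>
      if st.1 = 0 then (st.1 + 1, st.2 ++ [i * 2]) else (st.1, st.2 ++ [i]))
      (1, acc)).2 = acc ++ rest := by
  induction rest generalizing acc with
  | nil => simp
  | cons y ys ih => simp [List.foldl, ih]

-- ===== VERDICT (by name: the statement is the Claim_ definition above) =====
theorem duplicarFirst_spec : Claim_equal_duplicarFirst := by
  intro lista _
  unfold Spec_duplicarFirst duplicarFirst duplicarFirst_alt
  cases lista with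
  | nil => rfl
  | cons x rest => simp [List.foldl, dupFirst_tail_fold]
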